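-- pv_equiv track=rewrite | github.com/machinereading/Dialog_Frame_Parser | src/dataio.py | conll2tagseq
-- ===== SOURCE A (Python) =====
-- def conll2tagseq(data):
--     tokens, preds, senses, args = [],[],[],[]
--     result = []
--     for line in data:
--         line = line.strip()
--         if line.startswith('#'):
--             pass
--         elif line != '':
--             t = line.split('\t')
--             token, pred, sense, arg = t[1], t[2], t[3], t[4]
--             tokens.append(token)
--             preds.append(pred)
--             senses.append(sense)
--             args.append(arg)
--         else:
--             sent = []
--             sent.append(tokens)
--             sent.append(preds)
--             sent.append(senses)
--             sent.append(args)
--             result.append(sent)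
--             tokens, preds, senses, args = [],[],[],[]
--
--     return result
-- ===== SOURCE B (Python) =====
-- def conll2tagseq(data):
--     lines = [ln.strip() for ln in data]
--     lines = [ln for ln in lines if not ln.startswith('#')]
--     groups, cur = [], []
--     for ln in lines:
--         if ln == '':
--             groups.append(cur)
--             cur = []
--         else:
--             cur.append(ln)
--     result = []
--     for g in groups:
--         rows = [ln.split('\t')[1:5] for ln in g]
--         result.append([[r[j] for r in rows] for j in range(4)])
--     return result
-- ===== Notes on version B (the rewrite author's own statement) =====
-- stated objective: alternative
-- what changed: B replaces A's single stateful loop with four parallel accumulators by a pipeline: strip and drop comment lines, split the remaining lines into groups at blank lines (dropping the trailing residue), then transpose each group's split('\t')[1:5] rows into the four column lists.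
import Mathlib
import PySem

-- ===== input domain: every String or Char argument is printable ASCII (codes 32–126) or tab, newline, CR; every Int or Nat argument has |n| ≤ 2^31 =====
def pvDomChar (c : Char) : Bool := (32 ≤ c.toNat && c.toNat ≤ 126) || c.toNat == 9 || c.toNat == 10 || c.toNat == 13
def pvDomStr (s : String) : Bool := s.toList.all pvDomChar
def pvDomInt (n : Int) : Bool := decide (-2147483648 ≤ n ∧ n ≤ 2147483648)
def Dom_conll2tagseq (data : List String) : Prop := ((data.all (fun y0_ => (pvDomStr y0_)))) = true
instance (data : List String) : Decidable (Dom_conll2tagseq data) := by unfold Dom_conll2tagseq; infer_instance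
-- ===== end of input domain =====

-- B restructures A's single stateful loop (four parallel accumulators flushed at blank lines)
-- into a pipeline: strip+filter comments, split into groups at blank lines (drop trailing
-- residue), transpose each group's split-fields.  Objective: alternative decomposition.

-- ===== PORT A =====
-- literal transliteration of A's loop; state = (tokens, preds, senses, args, result).
-- t[1]..t[4] are pyGet? with default "" — under Pre_ the index is always in range.
def conll2tagseqStep
    (st : List String × List String × List String × List String × List (List (List String)))
    (line : String) :
    List String × List String × List String × List String × List (List (List String)) :=
  let (tokens, preds, senses, args, result) := st
  let l := PySem.Str.strip line
  if PySem.Str.startswith l "#" then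
    (tokens, preds, senses, args, result)
  else if l ≠ "" then
    let t := (PySem.Str.split? l "\t").getD []
    (tokens ++ [(PySem.List.pyGet? t 1).getD ""],
     preds ++ [(PySem.List.pyGet? t 2).getD ""],
     senses ++ [(PySem.List.pyGet? t 3).getD ""],
     args ++ [(PySem.List.pyGet? t 4).getD ""],
     result)
  else
    ([], [], [], [], result ++ [[tokens, preds, senses, args]])

def conll2tagseq (data : List String) : List (List (List String)) :=
  (data.foldl conll2tagseqStep ([], [], [], [], [])).2.2.2.2

-- ===== PORT B =====
-- grouping step of Source B: state = (groups, cur); blank line flushes cur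
def conll2tagseqAltStep (st : List (List String) × List String) (l : String) :
    List (List String) × List String :=
  if l = "" then (st.1 ++ [st.2], []) else (st.1, st.2 ++ [l])

def conll2tagseq_alt (data : List String) : List (List (List String)) :=
  let lines := (data.map (fun ln => PySem.Str.strip ln)).filter
    (fun ln => !(PySem.Str.startswith ln "#"))
  let groups := (lines.foldl conll2tagseqAltStep ([], [])).1
  groups.map (fun g =>
    let rows := g.map (fun ln => PySem.List.slice ((PySem.Str.split? ln "\t").getD []) (some 1) (some 5))
    (PySem.List.pyRange 0 4 1).map (fun j => rows.map (fun r => (PySem.List.pyGet? r j).getD "")))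

-- ===== PRECONDITION & SPEC =====
-- Pre_ excludes exactly the inputs where Python A raises IndexError: a stripped line that is
-- neither a comment nor blank but has fewer than 5 tab-separated fields.
def Pre_conll2tagseq (data : List String) : Prop :=
  ∀ ln ∈ data,
    ¬ PySem.Str.startswith (PySem.Str.strip ln) "#" = true →
    PySem.Str.strip ln ≠ "" →
    5 ≤ ((PySem.Str.split? (PySem.Str.strip ln) "\t").getD []).length

instance (data : List String) : Decidable (Pre_conll2tagseq data) := by
  unfold Pre_conll2tagseq; infer_instance

def pvWitness_conll2tagseq : List String :=
  ["# doc", "1\tJohn\tlove.01\tlove\tA0", "2\tsleeps\t_\t_\t_", ""]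

def Spec_conll2tagseq (data : List String) (out : List (List (List String))) : Prop :=
  out = conll2tagseq_alt data
instance (data : List String) (out : List (List (List String))) :
    Decidable (Spec_conll2tagseq data out) := by unfold Spec_conll2tagseq; infer_instance

-- ===== CLAIM (what is proved, stated in full; the proofs are below) =====
def Claim_equal_conll2tagseq : Prop :=
  ∀ (data : List String), Dom_conll2tagseq data → Pre_conll2tagseq data →
    Spec_conll2tagseq data (conll2tagseq data)

-- ===== LEMMAS AND PROOFS =====

-- the k-th column A accumulates over a group of (already stripped, non-comment, non-blank) lines
def pvColA (k : Int) (g : List String) : List String :=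
  g.map (fun l => (PySem.List.pyGet? ((PySem.Str.split? l "\t").getD []) k).getD "")

def pvSentOf (g : List String) : List (List String) :=
  [pvColA 1 g, pvColA 2 g, pvColA 3 g, pvColA 4 g]

lemma pvColA_append (k : Int) (g : List String) (l : String) :
    pvColA k (g ++ [l]) =
      pvColA k g ++ [(PySem.List.pyGet? ((PySem.Str.split? l "\t").getD []) k).getD ""] := by
  simp [pvColA]

-- indexing a [1:5] slice equals indexing the original list shifted by one (j = 0..3)
lemma pv_slice_get (t : List String) (j : Nat) (hj : j < 4) :
    (PySem.List.pyGet? (PySem.List.slice t (some 1) (some 5)) (j : Int)).getD "" =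
    (PySem.List.pyGet? t ((j : Int) + 1)).getD "" := by
  have h1 : PySem.List.slice t (some 1) (some 5) = (t.drop 1).take 4 := by
    have := PySem.List.slice_natCast t 1 5
    norm_num at this; simpa using this
  have h2 : ((j : Int) + 1) = (((j + 1 : Nat)) : Int) := by push_cast; ring
  rw [h1, h2, PySem.List.pyGet?_natCast, PySem.List.pyGet?_natCast]
  rcases t with _ | ⟨a, t⟩
  · simp
  · simp only [List.drop_succ_cons, List.drop_zero, List.getElem?_cons_succ]
    rw [List.getElem?_take_of_lt hj]

-- B's per-group transpose equals the four columns A accumulates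
lemma pv_group_eq (g : List String) :
    ((PySem.List.pyRange 0 4 1).map (fun j =>
      (g.map (fun ln => PySem.List.slice ((PySem.Str.split? ln "\t").getD []) (some 1) (some 5))).map
        (fun r => (PySem.List.pyGet? r j).getD ""))) = pvSentOf g := by
  have hr : PySem.List.pyRange 0 4 1 = [0, 1, 2, 3] := by
    norm_num [PySem.List.pyRange_one_cons]
  rw [hr, List.map_cons, List.map_cons, List.map_cons, List.map_cons, List.map_nil]
  have hcol : ∀ (j : Nat), j < 4 →
      ((g.map (fun ln => PySem.List.slice ((PySem.Str.split? ln "\t").getD []) (some 1) (some 5))).map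
        (fun r => (PySem.List.pyGet? r (j : Int)).getD "")) = pvColA ((j : Int) + 1) g := by
    intro j hj
    rw [List.map_map]
    refine List.map_congr_left fun l _ => ?_
    exact pv_slice_get ((PySem.Str.split? l "\t").getD []) j hj
  have h0 := hcol 0 (by omega); have h1 := hcol 1 (by omega)
  have h2 := hcol 2 (by omega); have h3 := hcol 3 (by omega)
  norm_num at h0 h1 h2 h3
  simp only [List.map_map, pvSentOf]
  rw [h0, h1, h2, h3]

-- how one step of A's loop acts, by case on the (stripped) line
lemma pv_step_comment (tk pr se ar : List String) (res : List (List (List String)))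
    (line : String) (h : PySem.Str.startswith (PySem.Str.strip line) "#" = true) :
    conll2tagseqStep (tk, pr, se, ar, res) line = (tk, pr, se, ar, res) := by
  simp only [conll2tagseqStep, h, if_true]

lemma pv_step_token (tk pr se ar : List String) (res : List (List (List String)))
    (line : String) (h : PySem.Str.startswith (PySem.Str.strip line) "#" = false)
    (hb : PySem.Str.strip line ≠ "") :
    conll2tagseqStep (tk, pr, se, ar, res) line =
      (tk ++ [(PySem.List.pyGet? ((PySem.Str.split? (PySem.Str.strip line) "\t").getD []) 1).getD ""],
       pr ++ [(PySem.List.pyGet? ((PySem.Str.split? (PySem.Str.strip line) "\t").getD []) 2).getD ""],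
       se ++ [(PySem.List.pyGet? ((PySem.Str.split? (PySem.Str.strip line) "\t").getD []) 3).getD ""],
       ar ++ [(PySem.List.pyGet? ((PySem.Str.split? (PySem.Str.strip line) "\t").getD []) 4).getD ""],
       res) := by
  simp only [conll2tagseqStep, h, Bool.false_eq_true, if_false]
  rw [if_pos hb]

lemma pv_step_blank (tk pr se ar : List String) (res : List (List (List String)))
    (line : String) (h : PySem.Str.startswith (PySem.Str.strip line) "#" = false)
    (hb : PySem.Str.strip line = "") :
    conll2tagseqStep (tk, pr, se, ar, res) line =
      ([], [], [], [], res ++ [[tk, pr, se, ar]]) := by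
  simp only [conll2tagseqStep, h, Bool.false_eq_true, if_false]
  rw [hb, if_neg (fun hne => hne rfl)]

-- main loop invariant: A's fold from a state describing (groups, cur) matches B's grouping fold
lemma pv_loop (data : List String) :
    ∀ (groups : List (List String)) (cur : List String),
    (data.foldl conll2tagseqStep
      (pvColA 1 cur, pvColA 2 cur, pvColA 3 cur, pvColA 4 cur, groups.map pvSentOf)).2.2.2.2
    = ((((data.map (fun ln => PySem.Str.strip ln)).filter
          (fun ln => !(PySem.Str.startswith ln "#"))).foldl
            conll2tagseqAltStep (groups, cur)).1).map pvSentOf := by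
  induction data with
  | nil => intro groups cur; simp
  | cons d rest ih =>
    intro groups cur
    simp only [List.map_cons, List.foldl_cons, List.filter_cons]
    by_cases hc : PySem.Str.startswith (PySem.Str.strip d) "#" = true
    · rw [pv_step_comment _ _ _ _ _ _ hc]
      simp only [hc, Bool.not_true, Bool.false_eq_true, if_false]
      exact ih groups cur
    · rw [Bool.not_eq_true] at hc
      simp only [hc, Bool.not_false, if_true]
      by_cases hb : PySem.Str.strip d = ""
      · rw [pv_step_blank _ _ _ _ _ _ hc hb]
        simp only [List.foldl_cons, conll2tagseqAltStep, hb, if_true]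
        have := ih (groups ++ [cur]) []
        simp only [pvColA, List.map_nil, List.map_append, List.map_cons, pvSentOf] at this ⊢
        exact this
      · rw [pv_step_token _ _ _ _ _ _ hc hb]
        simp only [List.foldl_cons, conll2tagseqAltStep, hb]
        have := ih groups (cur ++ [PySem.Str.strip d])
        simp only [pvColA_append] at this
        exact this

theorem pv_main (data : List String) : conll2tagseq data = conll2tagseq_alt data := by
  unfold conll2tagseq conll2tagseq_alt
  have h := pv_loop data [] []
  simp only [pvColA, List.map_nil] at h
  rw [h]
  exact (List.map_congr_left (fun g _ => (pv_group_eq g).symm))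

-- ===== VERDICT (by name: the statement is the Claim_ definition above) =====
theorem conll2tagseq_spec : Claim_equal_conll2tagseq := by
  intro data _ _
  exact pv_main data
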